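-- pv_equiv track=rewrite | github.com/saparbayev-azizbek/cybersecurity | source/shirflash/vernam_vijinir.py | for_shifr
-- ===== SOURCE A (Python) =====
-- def for_shifr(s, kalit):
--     s = s.upper()
--     kalit = kalit.upper()
--     m = []
--     for i in range(65, 91):
--         k = chr(i)
--         m.append(k)
--
--     special_characters = ['#', '!', '_', '@', '?', '*']
--
--     for char in special_characters:
--         m.append(char)
--
--     ikkilik = ["00000", "00001", "00010", "00011", "00100", "00101", "00110", "00111", "01000", "01001", "01010", "01011",
--                "01100", "01101", "01110", "01111", "10000", "10001", "10010", "10011", "10100", "10101", "10110", "10111",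
--                "11000", "11001", "11010", "11011", "11100", "11101", "11110", "11111"]
--     s1 = []
--
--     for char in s:
--         k = ord(char)
--         if 65 <= k <= 90:
--             s1.append(ikkilik[k - 65])
--         elif char == '#':
--             s1.append(ikkilik[26])
--         elif char == '!':
--             s1.append(ikkilik[27])
--         elif char == '_':
--             s1.append(ikkilik[28])
--         elif char == '@':
--             s1.append(ikkilik[29])
--         elif char == '?':
--             s1.append(ikkilik[30])
--         elif char == '*':
--             s1.append(ikkilik[31])
--     s2 = []
--
--     for char in kalit:
--         t = ord(char)
--         if 65 <= t <= 90:
--             s2.append(ikkilik[t - 65])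
--         elif char == '#':
--             s2.append(ikkilik[26])
--         elif char == '!':
--             s2.append(ikkilik[27])
--         elif char == '_':
--             s2.append(ikkilik[28])
--         elif char == '@':
--             s2.append(ikkilik[29])
--         elif char == '?':
--             s2.append(ikkilik[30])
--         elif char == '*':
--             s2.append(ikkilik[31])
--     g = ""
--     asosiy = []
--
--     for i in range(len(s1)):
--         x = s1[i]
--         y = s2[i]
--         for j in range(5):
--             a = int(x[j])
--             b = int(y[j])
--             d = a ^ b
--             l = str(d)
--             g += l
--         asosiy.append(g)
--         g = ""
--     Shifrlangan_soz = ""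
--     z = 0
--
--     while z < len(s):
--         for i in range(len(ikkilik)):
--             if asosiy[z] == ikkilik[i]:
--                 Shifrlangan_soz += m[i]
--                 break
--         z += 1
--
--     return Shifrlangan_soz
-- ===== SOURCE B (Python) =====
-- def for_shifr(s, kalit):
--     # Simpler: map chars to 0..31 indices via a dict, XOR the index pairs, map back.
--     m = [chr(c) for c in range(65, 91)] + ['#', '!', '_', '@', '?', '*']
--     pos = {c: i for i, c in enumerate(m)}
--     ks = [pos[c] for c in kalit.upper() if c in pos]
--     out = []
--     for i, c in enumerate(s.upper()):
--         out.append(m[pos[c] ^ ks[i]])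
--     return ''.join(out)
-- ===== Notes on version B (the rewrite author's own statement) =====
-- stated objective: simpler
-- what changed: B maps each character to its 0..31 index with a position dict and XORs the integer indices directly, replacing A's 5-bit binary-string tables, duplicated if/elif chains, per-bit string XOR with int()/str() round-trips and the linear re-scan of the 32-entry code table per output character.
import Mathlib
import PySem

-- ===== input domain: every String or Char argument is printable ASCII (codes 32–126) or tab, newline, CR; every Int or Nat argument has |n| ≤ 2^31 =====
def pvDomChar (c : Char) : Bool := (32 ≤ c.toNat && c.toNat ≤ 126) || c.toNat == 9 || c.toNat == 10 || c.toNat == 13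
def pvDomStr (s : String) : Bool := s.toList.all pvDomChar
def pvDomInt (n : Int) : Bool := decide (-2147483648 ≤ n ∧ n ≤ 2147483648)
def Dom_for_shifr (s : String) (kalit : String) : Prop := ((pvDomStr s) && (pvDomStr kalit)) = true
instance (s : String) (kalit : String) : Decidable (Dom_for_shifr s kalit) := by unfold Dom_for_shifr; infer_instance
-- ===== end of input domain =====

-- B replaces A's 5-bit binary-string encoding, per-character if/elif chains and
-- linear code-table re-scan by a position dict and one integer XOR per character (simpler, measured faster in a timing run).

-- ===== PORT A =====
-- chr(i); exact for the 65..90 range A uses it on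
def pvAChr (i : Int) : Char := Char.ofNat i.toNat

-- the ikkilik literal of A (strings ported as List Char)
def pvIkkilik : List (List Char) := [['0', '0', '0', '0', '0'], ['0', '0', '0', '0', '1'], ['0', '0', '0', '1', '0'], ['0', '0', '0', '1', '1'], ['0', '0', '1', '0', '0'], ['0', '0', '1', '0', '1'], ['0', '0', '1', '1', '0'], ['0', '0', '1', '1', '1'], ['0', '1', '0', '0', '0'], ['0', '1', '0', '0', '1'], ['0', '1', '0', '1', '0'], ['0', '1', '0', '1', '1'], ['0', '1', '1', '0', '0'], ['0', '1', '1', '0', '1'], ['0', '1', '1', '1', '0'], ['0', '1', '1', '1', '1'], ['1', '0', '0', '0', '0'], ['1', '0', '0', '0', '1'], ['1', '0', '0', '1', '0'], ['1', '0', '0', '1', '1'], ['1', '0', '1', '0', '0'], ['1', '0', '1', '0', '1'], ['1', '0', '1', '1', '0'], ['1', '0', '1', '1', '1'], ['1', '1', '0', '0', '0'], ['1', '1', '0', '0', '1'], ['1', '1', '0', '1', '0'], ['1', '1', '0', '1', '1'], ['1', '1', '1', '0', '0'], ['1', '1', '1', '0', '1'], ['1', '1', '1', '1', '0'], ['1',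 '1', '1', '1', '1']]

-- the body of A's two identical "for char in …" encoding loops (the if/elif chain)
def pvAEncode (ikkilik : List (List Char)) (acc : List (List Char)) (char : Char) : List (List Char) :=
  let k : Int := char.toNat
  if 65 ≤ k ∧ k ≤ 90 then acc ++ [PySem.List.pyGetD ikkilik (k - 65) []]
  else if char = '#' then acc ++ [PySem.List.pyGetD ikkilik 26 []]
  else if char = '!' then acc ++ [PySem.List.pyGetD ikkilik 27 []]
  else if char = '_' then acc ++ [PySem.List.pyGetD ikkilik 28 []]
  else if char = '@' then acc ++ [PySem.List.pyGetD ikkilik 29 []]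
  else if char = '?' then acc ++ [PySem.List.pyGetD ikkilik 30 []]
  else if char = '*' then acc ++ [PySem.List.pyGetD ikkilik 31 []]
  else acc

-- A's inner "for j in range(5)" bit loop building g (int(x[j]) ^ int(y[j]), appended as str)
def pvAXor5 (x y : List Char) : List Char :=
  (PySem.List.pyRange 0 5 1).foldl (fun g j =>
    let a := ((PySem.List.pyGet? x j).bind (fun c => PySem.Int.ofChars? [c])).getD 0
    let b := ((PySem.List.pyGet? y j).bind (fun c => PySem.Int.ofChars? [c])).getD 0
    let d := PySem.Int.bxor a b
    g ++ PySem.Int.toChars d) []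

-- A's "for i in range(len(ikkilik)): if asosiy[z] == ikkilik[i]: … += m[i]; break"
def pvAScan (ikkilik : List (List Char)) (m : List Char) (az : List Char) : List Int → List Char
  | [] => []
  | i :: rest =>
    if az = PySem.List.pyGetD ikkilik i [] then [PySem.List.pyGetD m i ' ']
    else pvAScan ikkilik m az rest

def for_shifr (s : String) (kalit : String) : String :=
  let sU := PySem.Chars.upper s.toList
  let kU := PySem.Chars.upper kalit.toList
  let m : List Char := (PySem.List.pyRange 65 91 1).foldl (fun m i => m ++ [pvAChr i]) []
  let m := ['#', '!', '_', '@', '?', '*'].foldl (fun m c => m ++ [c]) m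
  let ikkilik := pvIkkilik
  let s1 := sU.foldl (pvAEncode ikkilik) []
  let s2 := kU.foldl (pvAEncode ikkilik) []
  -- pyGetD defaults below are only reached where the Python raises IndexError (outside Pre_)
  let asosiy := (PySem.List.pyRange 0 (PySem.List.len s1) 1).foldl (fun asosiy i =>
    asosiy ++ [pvAXor5 (PySem.List.pyGetD s1 i []) (PySem.List.pyGetD s2 i [])]) []
  let out := (PySem.List.pyRange 0 (PySem.List.len sU) 1).foldl (fun acc z =>
    acc ++ pvAScan ikkilik m (PySem.List.pyGetD asosiy z []) (PySem.List.pyRange 0 (PySem.List.len ikkilik) 1)) []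
  String.ofList out

-- ===== PORT B =====
def for_shifr_alt (s : String) (kalit : String) : String :=
  let m : List Char := ((PySem.List.pyRange 65 91 1).map (fun c => Char.ofNat c.toNat)) ++ ['#', '!', '_', '@', '?', '*']
  let pos : PySem.Dict Char Int := PySem.Dict.ofList ((PySem.List.enumerate m).map (fun p => (p.2, p.1)))
  let ks := ((PySem.Chars.upper kalit.toList).filter (fun c => pos.contains c)).map (fun c => pos.getD c 0)
  -- getD/pyGetD defaults are only reached where the Python raises KeyError/IndexError (outside Pre_)
  let out := (PySem.List.enumerate (PySem.Chars.upper s.toList)).foldl (fun out p =>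
    out ++ [PySem.List.pyGetD m (PySem.Int.bxor (pos.getD p.2 0) (PySem.List.pyGetD ks p.1 0)) 'A']) []
  String.ofList out

-- ===== PRECONDITION & SPEC =====
-- the 32-character alphabet both programs use
def pvAlpha : List Char := ['A', 'B', 'C', 'D', 'E', 'F', 'G', 'H', 'I', 'J', 'K', 'L', 'M', 'N', 'O', 'P', 'Q', 'R', 'S', 'T', 'U', 'V', 'W', 'X', 'Y', 'Z', '#', '!', '_', '@', '?', '*']

-- Pre_ excludes exactly the inputs where A raises IndexError: an (upper-cased) character of s
-- outside the 32-character alphabet, or fewer alphabet characters in the key than len(s).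
def Pre_for_shifr (s : String) (kalit : String) : Prop :=
  ((PySem.Chars.upper s.toList).all (fun c => decide (c ∈ pvAlpha)) = true) ∧
  (PySem.Chars.upper s.toList).length ≤ ((PySem.Chars.upper kalit.toList).filter (fun c => decide (c ∈ pvAlpha))).length

instance (s : String) (kalit : String) : Decidable (Pre_for_shifr s kalit) := by
  unfold Pre_for_shifr; infer_instance

def pvWitness_for_shifr : String × String := ("HELLO?", "key#one")

def Spec_for_shifr (s : String) (kalit : String) (out : String) : Prop := out = for_shifr_alt s kalit
instance (s : String) (kalit : String) (out : String) : Decidable (Spec_for_shifr s kalit out) := by unfold Spec_for_shifr; infer_instance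

-- ===== CLAIM (what is proved, stated in full; the proofs are below) =====
def Claim_equal_for_shifr : Prop := ∀ (s : String) (kalit : String), Dom_for_shifr s kalit → Pre_for_shifr s kalit → Spec_for_shifr s kalit (for_shifr s kalit)

-- ===== LEMMAS AND PROOFS =====

-- toNat determines the character
theorem pvCharEq {c d : Char} (h : c.toNat = d.toNat) : c = d := Char.ext (UInt32.toNat_inj.mp h)

theorem pvMemAlpha (c : Char) (h1 : 65 ≤ c.toNat) (h2 : c.toNat ≤ 90) : c ∈ pvAlpha := by
  have hm : c.toNat ∈ pvAlpha.map Char.toNat := by simp [pvAlpha]; omega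
  obtain ⟨d, hd, hdn⟩ := List.mem_map.mp hm
  exact (pvCharEq hdn.symm ▸ hd)

-- one step of A's encoding loop, on an alphabet character (given by its index)
theorem pvStep (acc : List (List Char)) (v : Fin 32) :
    pvAEncode pvIkkilik acc (pvAlpha.get v) = acc ++ [pvIkkilik.getD v []] := by
  fin_cases v <;> simp [pvAEncode, pvAlpha, pvIkkilik, PySem.List.pyGetD, PySem.List.pyGet?] <;> decide

-- one step of A's encoding loop, on a character outside the alphabet
theorem pvStepNone (acc : List (List Char)) (c : Char) (h : c ∉ pvAlpha) :
    pvAEncode pvIkkilik acc c = acc := by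
  have h2 : c ≠ '#' := fun e => h (e ▸ (by decide))
  have h3 : c ≠ '!' := fun e => h (e ▸ (by decide))
  have h4 : c ≠ '_' := fun e => h (e ▸ (by decide))
  have h5 : c ≠ '@' := fun e => h (e ▸ (by decide))
  have h6 : c ≠ '?' := fun e => h (e ▸ (by decide))
  have h7 : c ≠ '*' := fun e => h (e ▸ (by decide))
  simp only [pvAEncode]
  split_ifs with hif
  · exact absurd (pvMemAlpha c (by omega) (by omega)) h
  all_goals simp_all

-- A's whole encoding loop
theorem pvEncFold (L : List Char) (acc : List (List Char)) :
    L.foldl (pvAEncode pvIkkilik) acc =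
      acc ++ (L.filter (fun c => decide (c ∈ pvAlpha))).map
        (fun c => pvIkkilik.getD (pvAlpha.idxOf c) []) := by
  induction L generalizing acc with
  | nil => simp
  | cons c L ih =>
    by_cases hc : c ∈ pvAlpha
    · have hlt : pvAlpha.idxOf c < 32 := List.idxOf_lt_length_of_mem hc
      have hget : pvAlpha.get ⟨pvAlpha.idxOf c, hlt⟩ = c := List.getElem_idxOf hlt
      simp only [List.foldl_cons, List.filter_cons, hc, decide_true]
      rw [show pvAEncode pvIkkilik acc c = acc ++ [pvIkkilik.getD (pvAlpha.idxOf c) []] from by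
        conv_lhs => rw [← hget]
        exact pvStep acc ⟨pvAlpha.idxOf c, hlt⟩]
      rw [ih]; simp
    · simp only [List.foldl_cons, List.filter_cons, hc, decide_false]
      rw [pvStepNone acc c hc, ih]; simp

-- the XOR of two 5-bit codes is the code of the XOR of the indices
theorem pvXorCode : ∀ a b : Fin 32,
    pvAXor5 (pvIkkilik.getD a []) (pvIkkilik.getD b []) = pvIkkilik.getD (a.val ^^^ b.val) [] := by
  decide

theorem pvXorLt : ∀ a b : Fin 32, a.val ^^^ b.val < 32 := by decide

-- A's inner scan-with-break over the alphabet
theorem pvScanCode : ∀ v : Fin 32,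
    pvAScan pvIkkilik pvAlpha (pvIkkilik.getD v []) (PySem.List.pyRange 0 32 1) = [pvAlpha.getD v ' '] := by
  decide

-- A's two constant lists
theorem pvAM_eq :
    ['#', '!', '_', '@', '?', '*'].foldl (fun m c => m ++ [c])
      ((PySem.List.pyRange 65 91 1).foldl (fun m i => m ++ [pvAChr i]) []) = pvAlpha := by decide

theorem pvBM_eq :
    ((PySem.List.pyRange 65 91 1).map (fun c => Char.ofNat c.toNat)) ++ ['#', '!', '_', '@', '?', '*'] = pvAlpha := by decide

-- B's position dict
def pvPos : PySem.Dict Char Int := PySem.Dict.ofList ((PySem.List.enumerate pvAlpha).map (fun p => (p.2, p.1)))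

set_option maxRecDepth 10000 in
theorem pvPosKeys : pvPos.keys = pvAlpha := by decide

theorem pvPosContains (c : Char) : pvPos.contains c = decide (c ∈ pvAlpha) := by
  rw [PySem.Dict.contains_eq_decide_mem_keys, pvPosKeys]

-- pvPos as a literal dict, then a per-character lookup check
def pvPosLit : PySem.Dict Char Int := PySem.Dict.mk [('A', 0), ('B', 1), ('C', 2), ('D', 3), ('E', 4), ('F', 5), ('G', 6), ('H', 7), ('I', 8), ('J', 9), ('K', 10), ('L', 11), ('M', 12), ('N', 13), ('O', 14), ('P', 15), ('Q', 16), ('R', 17), ('S', 18), ('T', 19), ('U', 20), ('V', 21), ('W', 22), ('X', 23), ('Y', 24), ('Z', 25), ('#', 26), ('!', 27), ('_', 28), ('@', 29), ('?', 30), ('*', 31)]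

set_option maxRecDepth 4000 in
theorem pvPos_eq : pvPos = pvPosLit := by decide

theorem pvPosGetD_mem : ∀ c ∈ pvAlpha, pvPos.getD c 0 = (pvAlpha.idxOf c : Int) := by
  rw [pvPos_eq]; intro c hc; fin_cases hc <;> decide

-- Nat-index forms of the finite lemmas
theorem pvXorCodeN (a b : Nat) (ha : a < 32) (hb : b < 32) :
    pvAXor5 (pvIkkilik.getD a []) (pvIkkilik.getD b []) = pvIkkilik.getD (a ^^^ b) [] :=
  pvXorCode ⟨a, ha⟩ ⟨b, hb⟩

theorem pvXorLtN (a b : Nat) (ha : a < 32) (hb : b < 32) : a ^^^ b < 32 :=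
  pvXorLt ⟨a, ha⟩ ⟨b, hb⟩

theorem pvScanCodeN (v : Nat) (hv : v < 32) :
    pvAScan pvIkkilik pvAlpha (pvIkkilik.getD v []) (PySem.List.pyRange 0 32 1) = [pvAlpha.getD v ' '] :=
  pvScanCode ⟨v, hv⟩

-- the common canonical form both ports reduce to
def pvCanon (S Kf : List Char) : List Char :=
  (List.range S.length).map (fun k =>
    pvAlpha.getD ((pvAlpha.idxOf (S.getD k ' ')) ^^^ (pvAlpha.idxOf (Kf.getD k ' '))) ' ')

-- proof-only copies of the two bodies, abstracted over the upper-cased character lists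
def pvABody (S K : List Char) : String :=
  let m : List Char := (PySem.List.pyRange 65 91 1).foldl (fun m i => m ++ [pvAChr i]) []
  let m := ['#', '!', '_', '@', '?', '*'].foldl (fun m c => m ++ [c]) m
  let ikkilik := pvIkkilik
  let s1 := S.foldl (pvAEncode ikkilik) []
  let s2 := K.foldl (pvAEncode ikkilik) []
  let asosiy := (PySem.List.pyRange 0 (PySem.List.len s1) 1).foldl (fun asosiy i =>
    asosiy ++ [pvAXor5 (PySem.List.pyGetD s1 i []) (PySem.List.pyGetD s2 i [])]) []
  let out := (PySem.List.pyRange 0 (PySem.List.len S) 1).foldl (fun acc z =>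
    acc ++ pvAScan ikkilik m (PySem.List.pyGetD asosiy z []) (PySem.List.pyRange 0 (PySem.List.len ikkilik) 1)) []
  String.ofList out

def pvBBody (S K : List Char) : String :=
  let m : List Char := ((PySem.List.pyRange 65 91 1).map (fun c => Char.ofNat c.toNat)) ++ ['#', '!', '_', '@', '?', '*']
  let pos : PySem.Dict Char Int := PySem.Dict.ofList ((PySem.List.enumerate m).map (fun p => (p.2, p.1)))
  let ks := (K.filter (fun c => pos.contains c)).map (fun c => pos.getD c 0)
  let out := (PySem.List.enumerate S).foldl (fun out p =>
    out ++ [PySem.List.pyGetD m (PySem.Int.bxor (pos.getD p.2 0) (PySem.List.pyGetD ks p.1 0)) 'A']) []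
  String.ofList out

-- a flatMap over range(n) whose pieces are singletons is a map
theorem pvFlatMapRange {a : Type} (n : Nat) (f : Int → List a) (e : Nat → a)
    (h : ∀ k, k < n → f (k : Int) = [e k]) :
    (((List.range n).map (fun k => ((k : Nat) : Int))).flatMap f) = (List.range n).map e := by
  induction n with
  | zero => simp
  | succ n ih =>
    rw [List.range_succ]
    simp only [List.map_append, List.flatMap_append, List.map_cons, List.map_nil,
      List.flatMap_cons, List.flatMap_nil]
    rw [ih (fun k hk => h k (Nat.lt_succ_of_lt hk)), h n (Nat.lt_succ_self n)]
    simp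

theorem pvLenIkk : PySem.List.len pvIkkilik = 32 := by decide

theorem pvA_canon (s kalit : String)
    (hS : ∀ c ∈ PySem.Chars.upper s.toList, c ∈ pvAlpha)
    (hlen : (PySem.Chars.upper s.toList).length ≤
      ((PySem.Chars.upper kalit.toList).filter (fun c => decide (c ∈ pvAlpha))).length) :
    for_shifr s kalit = String.ofList
      (pvCanon (PySem.Chars.upper s.toList)
        ((PySem.Chars.upper kalit.toList).filter (fun c => decide (c ∈ pvAlpha)))) := by
  rw [show for_shifr s kalit = pvABody (PySem.Chars.upper s.toList) (PySem.Chars.upper kalit.toList) from rfl]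
  generalize hSg : PySem.Chars.upper s.toList = S at hS hlen ⊢
  generalize hKg : PySem.Chars.upper kalit.toList = K at hlen ⊢
  have hfS : S.filter (fun c => decide (c ∈ pvAlpha)) = S :=
    List.filter_eq_self.mpr (fun a ha => by simpa using hS a ha)
  simp only [pvABody]
  rw [pvAM_eq, pvLenIkk]
  simp only [pvEncFold, List.nil_append, hfS, PySem.List.len_eq, List.length_map,
    PySem.List.foldl_append_singleton_eq_map, PySem.List.foldl_append_eq_flatMap,
    PySem.List.pyRange_zero_natCast]
  congr 1
  rw [pvCanon]
  apply pvFlatMapRange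
  intro k hk
  have hKfLen : k < (K.filter (fun c => decide (c ∈ pvAlpha))).length := lt_of_lt_of_le hk hlen
  have hSk : S[k] ∈ pvAlpha := hS _ (List.getElem_mem hk)
  have hKfk : (K.filter (fun c => decide (c ∈ pvAlpha)))[k] ∈ pvAlpha := by
    have := List.mem_filter.mp (List.getElem_mem hKfLen)
    simpa using this.2
  have ha : pvAlpha.idxOf S[k] < 32 := List.idxOf_lt_length_of_mem hSk
  have hb : pvAlpha.idxOf (K.filter (fun c => decide (c ∈ pvAlpha)))[k] < 32 :=
    List.idxOf_lt_length_of_mem hKfk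
  rw [PySem.List.pyGetD_natCast]
  rw [List.map_map]
  rw [List.getD_eq_getElem _ _ (by simpa using hk)]
  simp only [List.getElem_map, List.getElem_range, Function.comp]
  rw [PySem.List.pyGetD_natCast, PySem.List.pyGetD_natCast]
  rw [List.getD_eq_getElem _ _ (by simpa using hk),
      List.getD_eq_getElem _ _ (by simpa using hKfLen)]
  simp only [List.getElem_map]
  rw [pvXorCodeN _ _ ha hb]
  rw [pvScanCodeN _ (pvXorLtN _ _ ha hb)]
  rw [List.getD_eq_getElem _ _ hk, List.getD_eq_getElem _ _ hKfLen]

theorem pvB_canon (s kalit : String)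
    (hS : ∀ c ∈ PySem.Chars.upper s.toList, c ∈ pvAlpha)
    (hlen : (PySem.Chars.upper s.toList).length ≤
      ((PySem.Chars.upper kalit.toList).filter (fun c => decide (c ∈ pvAlpha))).length) :
    for_shifr_alt s kalit = String.ofList
      (pvCanon (PySem.Chars.upper s.toList)
        ((PySem.Chars.upper kalit.toList).filter (fun c => decide (c ∈ pvAlpha)))) := by
  rw [show for_shifr_alt s kalit = pvBBody (PySem.Chars.upper s.toList) (PySem.Chars.upper kalit.toList) from rfl]
  generalize hSg : PySem.Chars.upper s.toList = S at hS hlen ⊢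
  generalize hKg : PySem.Chars.upper kalit.toList = K at hlen ⊢
  have hcontains : (fun c => pvPos.contains c) = (fun c => decide (c ∈ pvAlpha)) :=
    funext pvPosContains
  simp only [pvBBody, pvBM_eq]
  rw [show PySem.Dict.ofList ((PySem.List.enumerate pvAlpha).map (fun p => (p.2, p.1))) = pvPos from rfl]
  rw [hcontains]
  simp only [PySem.List.foldl_append_singleton_eq_map, List.nil_append]
  rw [PySem.List.enumerate_eq_map_pyRange (d := 'A')]
  simp only [PySem.List.len_eq, PySem.List.pyRange_zero_natCast, List.map_map]
  congr 1
  rw [pvCanon]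
  apply List.map_congr_left
  intro k hkmem
  have hk : k < S.length := List.mem_range.mp hkmem
  have hKfLen : k < (K.filter (fun c => decide (c ∈ pvAlpha))).length := lt_of_lt_of_le hk hlen
  have hSk : S[k] ∈ pvAlpha := hS _ (List.getElem_mem hk)
  have hKfk : (K.filter (fun c => decide (c ∈ pvAlpha)))[k] ∈ pvAlpha := by
    have := List.mem_filter.mp (List.getElem_mem hKfLen)
    simpa using this.2
  have ha : pvAlpha.idxOf S[k] < 32 := List.idxOf_lt_length_of_mem hSk
  have hb : pvAlpha.idxOf (K.filter (fun c => decide (c ∈ pvAlpha)))[k] < 32 :=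
    List.idxOf_lt_length_of_mem hKfk
  simp only [Function.comp_apply, PySem.List.pyGetD_natCast]
  rw [List.getD_eq_getElem _ _ hk]
  rw [pvPosGetD_mem _ hSk]
  rw [List.getD_eq_getElem _ _ (show k < (List.map (fun c => pvPos.getD c 0) (List.filter (fun c => decide (c ∈ pvAlpha)) K)).length from by simpa using hKfLen)]
  simp only [List.getElem_map]
  rw [pvPosGetD_mem _ hKfk]
  rw [PySem.Int.bxor_natCast]
  rw [PySem.List.pyGetD_natCast]
  rw [List.getD_eq_getElem _ _ (show _ < pvAlpha.length from pvXorLtN _ _ ha hb)]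
  rw [List.getD_eq_getElem _ _ hk, List.getD_eq_getElem _ _ hKfLen]
  rw [List.getD_eq_getElem _ _ (show _ < pvAlpha.length from pvXorLtN _ _ ha hb)]

-- ===== VERDICT (by name: the statement is the Claim_ definition above) =====
theorem for_shifr_spec : Claim_equal_for_shifr := by
  intro s kalit _hdom hpre
  obtain ⟨hS', hlen⟩ := hpre
  have hS : ∀ c ∈ PySem.Chars.upper s.toList, c ∈ pvAlpha := by
    intro c hc; exact of_decide_eq_true (List.all_eq_true.mp hS' c hc)
  unfold Spec_for_shifr
  rw [pvA_canon s kalit hS hlen, pvB_canon s kalit hS hlen]
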